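/-
  THE CONTRACTS OF THE SANITIZER'S RUNTIME, as the unit statements use them. The `Spec`s and the fast-path form of the eight small
  check routines are Asan/Runtime.lean's and Asan/Check.lean's (THE LEAN SPEC IS THE CONTRACT); here: the frame sizes as `vspec`
  rewrite rules. The runtime RECORD of a program (`rt : Asan.Runtime`: the runtime's entry points + the descriptor table of the
  program's registered globals) is the program's own: `<Prog>/Spec/Rt.lean`.

      __asan_{load,store}{1,2,4,8}_noabort     NO `Spec`: the statement of each is `Asan.SmallCheck Lay μ (WayInv T) (CodeOK T u₀) clob K entry`
                                               with clob = [rax, rdx] (K = 1), [rax, rcx, rdx] (K = 2, 4, 8)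
      __asan_{load,store}16_noabort            `Asan.check16Spec`       __asan_{store,load}N_noabort   `Asan.checkNSpec`
      range_bad                                `Asan.rangeBadSpec`
      arena_unpoison / arena_poison            `Asan.arenaUnpoisonSpec` / `Asan.arenaPoisonSpec`
      __asan_register_globals / _sub_I_65535_1 / run_ctors      `Asan.registerGlobalsSpec rt` / `Asan.ctorSpec rt` / `Asan.runCtorsSpec rt`
      __asan_report                            NO UNIT: it is never called in a proved run ("rip ≠ T.report at every step" IS the
                                               theorem); nothing is proved about its body
-/
import ProgX.Spec.Basic
namespace ProgX.Spec
open X86 X86.User Asan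

@[vspec] theorem rangeBadSpec_frame : rangeBadSpec.frame = 0 := id rfl
@[vspec] theorem rangeBadSpec_writes (u : State) : rangeBadSpec.writes u = [] := id rfl
@[vspec] theorem check16Spec_frame : check16Spec.frame = 16 := id rfl
@[vspec] theorem check16Spec_writes (u : State) : check16Spec.writes u = [] := id rfl
@[vspec] theorem checkNSpec_frame : checkNSpec.frame = 32 := id rfl
@[vspec] theorem checkNSpec_writes (u : State) : checkNSpec.writes u = [] := id rfl
@[vspec] theorem arenaUnpoisonSpec_frame : arenaUnpoisonSpec.frame = 0 := id rfl
@[vspec] theorem arenaPoisonSpec_frame : arenaPoisonSpec.frame = 0 := id rfl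
@[vspec] theorem registerGlobalsSpec_frame (R : Runtime) : (registerGlobalsSpec R).frame = 0 := id rfl
@[vspec] theorem ctorSpec_frame (R : Runtime) : (ctorSpec R).frame = 16 := id rfl
@[vspec] theorem runCtorsSpec_frame (R : Runtime) : (runCtorsSpec R).frame = 32 := id rfl

/-! ### The footprints of `arena_poison` / `arena_unpoison` as literal lists

NOT `@[vspec]` (accepted allocator proofs rewrite with their own copies after `v_after_call`): use
`simp only [arenaPoisonSpec_writes, Asan.shadowSpan] at w_same` after `v_after_call`. -/

/-- The footprint of `arena_unpoison(rdi = a, rsi = n)` as a literal list: the shadow of `[a, a + n)`. -/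
theorem arenaUnpoisonSpec_writes (u : State) :
    arenaUnpoisonSpec.writes u = [shadowSpan (u.reg .rdi).toNat ((u.reg .rdi).toNat + (u.reg .rsi).toNat)] := id rfl

/-- The footprint of `arena_poison(rdi = a, rsi = n)` as a literal list: the shadow of `[a, a + n)`. -/
theorem arenaPoisonSpec_writes (u : State) :
    arenaPoisonSpec.writes u = [shadowSpan (u.reg .rdi).toNat ((u.reg .rdi).toNat + (u.reg .rsi).toNat)] := id rfl

end ProgX.Spec
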